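-- pv_equiv track=rewrite | github.com/Lembck/WordGenerator | wordMaker.py | getLetterParts
-- ===== SOURCE A (Python) =====
-- vowels = "aeiouy"
--
-- consons = "bcdfghjklmnpqrstvwxz"
--
-- def makeUpper(char, yes):
--     if yes:
--         return char.upper()
--     return char
--
-- def convertToCV(word):
--     seq = ""
--     first = True
--     for letter in word:
--         if letter.lower() in vowels:
--             seq += makeUpper("v", first or letter.isupper())
--         elif letter.lower() in consons:
--             seq += makeUpper("c", first or letter.isupper())
--         else:
--             seq += letter
--         first = False
--     return seq + "."
--
-- def getParts(word, partsSoFar):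
--     if partsSoFar == []:
--         partsSoFar = [word[0]]
--     elif word == "":
--         return partsSoFar
--     elif word[0] == partsSoFar[-1][0].lower() or word[0] == ".":
--         partsSoFar[-1] += word[0]
--     else:
--         partsSoFar.append(word[0])
--     return getParts(word[1:], partsSoFar)
--
-- def getLetterParts(word):
--     parts = getParts(convertToCV(word), [])
--     letterParts = []
--     for part in parts:
--         letterParts.append(word[:len(part)])
--         word = word[len(part):]
--     letterParts[-1] += "."
--     return (parts, letterParts)
-- ===== SOURCE B (Python) =====
-- vowels = "aeiouy"
--
-- consons = "bcdfghjklmnpqrstvwxz"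
--
-- def getLetterParts(word):
--     # one linear pass to build the CV sequence
--     cv = []
--     first = True
--     for ch in word:
--         l = ch.lower()
--         if l in vowels:
--             cv.append('V' if first or ch.isupper() else 'v')
--         elif l in consons:
--             cv.append('C' if first or ch.isupper() else 'c')
--         else:
--             cv.append(ch)
--         first = False
--     cv.append('.')
--     cvs = ''.join(cv)
--     # linear run-length grouping: a char extends the current run if it equals
--     # the lowercase of the run's first char, or is '.'
--     lens = []
--     runlen = 0
--     runfirst = ''
--     for c in cvs:
--         if runlen > 0 and (c == runfirst.lower() or c == '.'):
--             runlen += 1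
--         else:
--             if runlen > 0:
--                 lens.append(runlen)
--             runlen = 1
--             runfirst = c
--     lens.append(runlen)
--     # cut both strings at the same run boundaries with a running index
--     parts = []
--     letterParts = []
--     i = 0
--     for n in lens:
--         parts.append(cvs[i:i + n])
--         letterParts.append(word[i:i + n])
--         i += n
--     letterParts[-1] += "."
--     return (parts, letterParts)
-- ===== Notes on version B (the rewrite author's own statement) =====
-- stated objective: faster
-- what changed: Replaces A's O(n^2) pipeline (recursive getParts that re-slices the string on every call, then a loop that repeatedly re-slices word) with a single linear pass that run-length-groups the CV string and then cuts both strings at the run boundaries with a running index.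
import Mathlib
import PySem

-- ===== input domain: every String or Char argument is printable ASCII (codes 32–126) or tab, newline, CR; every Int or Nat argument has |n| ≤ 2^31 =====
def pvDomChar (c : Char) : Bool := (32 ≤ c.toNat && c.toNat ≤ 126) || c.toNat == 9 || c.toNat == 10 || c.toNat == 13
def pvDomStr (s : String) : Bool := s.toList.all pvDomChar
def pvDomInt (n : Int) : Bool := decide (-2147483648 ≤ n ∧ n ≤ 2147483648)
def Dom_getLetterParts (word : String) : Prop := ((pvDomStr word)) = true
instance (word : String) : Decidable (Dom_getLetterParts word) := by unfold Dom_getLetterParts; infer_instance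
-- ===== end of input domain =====

-- B replaces A's O(n^2) recursive slicing with one linear run-length pass and
-- index-based cuts; same return value on every input (both programs are total).

-- shared trivial helper: Python's  xs[-1] += c  (append a char to the last string of the list)
def pvUpdLast : List (List Char) → Char → List (List Char)
  | [], _ => []
  | [p], c => [p ++ [c]]
  | p :: ps, c => p :: pvUpdLast ps c

-- ===== PORT A =====
def pvVowels : List Char := ['a', 'e', 'i', 'o', 'u', 'y']
def pvConsons : List Char := ['b','c','d','f','g','h','j','k','l','m','n','p','q','r','s','t','v','w','x','z']

def makeUpperA (c : Char) (yes : Bool) : Char :=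
  if yes then PySem.Chars.upperChar c else c

-- the 'seq += …' loop of convertToCV, on code points
def convertToCVA (word : List Char) : List Char :=
  (word.foldl (fun (st : List Char × Bool) letter =>
      if PySem.Chars.lowerChar letter ∈ pvVowels then
        (st.1 ++ [makeUpperA 'v' (st.2 || PySem.Chars.isupper letter)], false)
      else if PySem.Chars.lowerChar letter ∈ pvConsons then
        (st.1 ++ [makeUpperA 'c' (st.2 || PySem.Chars.isupper letter)], false)
      else
        (st.1 ++ [letter], false)) ([], true)).1 ++ ['.']

-- getParts: literal recursion; in the (word = "", partsSoFar = []) case Python raises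
-- IndexError on word[0] — unreachable from getLetterParts (convertToCV never returns "")
def getPartsA : List Char → List (List Char) → List (List Char)
  | [], [] => []
  | c :: rest, [] => getPartsA rest [[c]]
  | [], parts => parts
  | c :: rest, parts =>
      if c = PySem.Chars.lowerChar ((parts.getLastD []).headD ' ') ∨ c = '.' then
        getPartsA rest (pvUpdLast parts c)
      else
        getPartsA rest (parts ++ [[c]])

def getLetterParts (word : String) : List String × List String :=
  let parts := getPartsA (convertToCVA word.toList) []
  -- for part in parts: letterParts.append(word[:len(part)]); word = word[len(part):]
  let st := parts.foldl (fun (st : List Char × List (List Char)) part =>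
      (st.1.drop part.length, st.2 ++ [st.1.take part.length])) (word.toList, [])
  let letterParts := pvUpdLast st.2 '.'   -- letterParts[-1] += "."
  (parts.map (fun p => String.ofList p), letterParts.map (fun p => String.ofList p))

-- ===== PORT B =====
def getLetterParts_alt (word : String) : List String × List String :=
  -- one linear pass to build the CV sequence
  let cv := (word.toList.foldl (fun (st : List Char × Bool) ch =>
      let l := PySem.Chars.lowerChar ch
      if l ∈ pvVowels then
        (st.1 ++ [if st.2 || PySem.Chars.isupper ch then 'V' else 'v'], false)
      else if l ∈ pvConsons then
        (st.1 ++ [if st.2 || PySem.Chars.isupper ch then 'C' else 'c'], false)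
      else
        (st.1 ++ [ch], false)) ([], true)).1
  let cvs := cv ++ ['.']
  -- linear run-length grouping; state = (lens, runlen, runfirst)
  let r := cvs.foldl (fun (st : List Nat × Nat × Char) (c : Char) =>
      if 0 < st.2.1 ∧ (c = PySem.Chars.lowerChar st.2.2 ∨ c = '.') then
        (st.1, st.2.1 + 1, st.2.2)
      else
        ((if 0 < st.2.1 then st.1 ++ [st.2.1] else st.1), 1, c)) ([], 0, ' ')
  let lens := r.1 ++ [r.2.1]
  -- cut both strings at the run boundaries with a running index i
  let s := lens.foldl (fun (st : List (List Char) × List (List Char) × Nat) (n : Nat) =>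
      (st.1 ++ [PySem.List.slice cvs (some (st.2.2 : Int)) (some ((st.2.2 : Int) + (n : Int)))],
       st.2.1 ++ [PySem.List.slice word.toList (some (st.2.2 : Int)) (some ((st.2.2 : Int) + (n : Int)))],
       st.2.2 + n)) ([], [], 0)
  let letterParts := pvUpdLast s.2.1 '.'   -- letterParts[-1] += "."
  (s.1.map (fun p => String.ofList p), letterParts.map (fun p => String.ofList p))

-- ===== PRECONDITION & SPEC =====
def Spec_getLetterParts (word : String) (out : List String × List String) : Prop := out = getLetterParts_alt word
instance (word : String) (out : List String × List String) : Decidable (Spec_getLetterParts word out) := by unfold Spec_getLetterParts; infer_instance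

-- ===== CLAIM (what is proved, stated in full; the proofs are below) =====
def Claim_equal_getLetterParts : Prop := ∀ (word : String), Dom_getLetterParts word → Spec_getLetterParts word (getLetterParts word)

-- ===== LEMMAS AND PROOFS =====

-- canonical grouping: the current run started with f and has accumulated acc
def pvGrp (f : Char) (acc : List Char) : List Char → List (List Char)
  | [] => [acc]
  | c :: rest =>
      if c = PySem.Chars.lowerChar f ∨ c = '.' then pvGrp f (acc ++ [c]) rest
      else acc :: pvGrp c [c] rest

-- run lengths of the canonical grouping
def pvLens (f : Char) (n : Nat) : List Char → List Nat
  | [] => [n]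
  | c :: rest =>
      if c = PySem.Chars.lowerChar f ∨ c = '.' then pvLens f (n + 1) rest
      else n :: pvLens c 1 rest

-- cutting a list at the given lengths
def pvCuts {α : Type} (xs : List α) : List Nat → List (List α)
  | [] => []
  | n :: rest => xs.take n :: pvCuts (xs.drop n) rest

theorem pvUpdLast_concat (init : List (List Char)) (p : List Char) (c : Char) :
    pvUpdLast (init ++ [p]) c = init ++ [p ++ [c]] := by
  induction init with
  | nil => rfl
  | cons q qs ih =>
      cases qs with
      | nil => simp [pvUpdLast]
      | cons r rs => simpa [pvUpdLast] using ih

theorem getPartsA_eq_grp (word : List Char) : ∀ (init : List (List Char)) (f : Char) (t : List Char),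
    getPartsA word (init ++ [f :: t]) = init ++ pvGrp f (f :: t) word := by
  induction word with
  | nil =>
      intro init f t
      cases init with
      | nil => rfl
      | cons q qs => simp [getPartsA, pvGrp]
  | cons c rest ih =>
      intro init f t
      have hlast : ((init ++ [f :: t]).getLastD []).headD ' ' = f := by
        simp
      rw [show getPartsA (c :: rest) (init ++ [f :: t]) =
            (if c = PySem.Chars.lowerChar (((init ++ [f :: t]).getLastD []).headD ' ') ∨ c = '.' then
              getPartsA rest (pvUpdLast (init ++ [f :: t]) c)
            else getPartsA rest ((init ++ [f :: t]) ++ [[c]])) from by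
        cases init <;> rfl]
      rw [hlast]
      by_cases h : c = PySem.Chars.lowerChar f ∨ c = '.'
      · rw [if_pos h, pvUpdLast_concat]
        have := ih init f (t ++ [c])
        simpa [pvGrp, h] using this
      · rw [if_neg h]
        have := ih (init ++ [f :: t]) c []
        simp only [List.append_assoc] at this
        simpa [pvGrp, h] using this

theorem lens_eq_grp_map (word : List Char) : ∀ (f : Char) (acc : List Char),
    (pvGrp f acc word).map List.length = pvLens f acc.length word := by
  induction word with
  | nil => intro f acc; rfl
  | cons c rest ih =>
      intro f acc
      by_cases h : c = PySem.Chars.lowerChar f ∨ c = '.'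
      · have := ih f (acc ++ [c])
        simpa [pvGrp, pvLens, h] using this
      · have := ih c [c]
        simpa [pvGrp, pvLens, h] using this

theorem grp_flatten (word : List Char) : ∀ (f : Char) (acc : List Char),
    (pvGrp f acc word).flatten = acc ++ word := by
  induction word with
  | nil => intro f acc; simp [pvGrp]
  | cons c rest ih =>
      intro f acc
      by_cases h : c = PySem.Chars.lowerChar f ∨ c = '.'
      · have := ih f (acc ++ [c])
        simp [pvGrp, h, this]
      · have := ih c [c]
        simp [pvGrp, h, this]

theorem cuts_flatten (parts : List (List Char)) :
    pvCuts parts.flatten (parts.map List.length) = parts := by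
  induction parts with
  | nil => rfl
  | cons p ps ih =>
      simp [pvCuts, ih]

-- B's run-length loop computes pvLens
theorem lensLoopB (word : List Char) : ∀ (lens : List Nat) (n : Nat) (f : Char), 0 < n →
    (word.foldl (fun (st : List Nat × Nat × Char) (c : Char) =>
        if 0 < st.2.1 ∧ (c = PySem.Chars.lowerChar st.2.2 ∨ c = '.') then
          (st.1, st.2.1 + 1, st.2.2)
        else
          ((if 0 < st.2.1 then st.1 ++ [st.2.1] else st.1), 1, c)) (lens, n, f)).1
      ++ [(word.foldl (fun (st : List Nat × Nat × Char) (c : Char) =>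
        if 0 < st.2.1 ∧ (c = PySem.Chars.lowerChar st.2.2 ∨ c = '.') then
          (st.1, st.2.1 + 1, st.2.2)
        else
          ((if 0 < st.2.1 then st.1 ++ [st.2.1] else st.1), 1, c)) (lens, n, f)).2.1]
      = lens ++ pvLens f n word := by
  induction word with
  | nil => intro lens n f _; rfl
  | cons c rest ih =>
      intro lens n f hn
      by_cases h : c = PySem.Chars.lowerChar f ∨ c = '.'
      · have := ih lens (n + 1) f (by omega)
        simpa [List.foldl_cons, hn, h, pvLens] using this
      · have := ih (lens ++ [n]) 1 c (by omega)
        simp only [List.append_assoc] at this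
        simpa [List.foldl_cons, hn, h, pvLens] using this

-- A's word-consuming loop computes pvCuts
theorem lettersLoopA (parts : List (List Char)) : ∀ (w : List Char) (acc : List (List Char)),
    (parts.foldl (fun (st : List Char × List (List Char)) part =>
        (st.1.drop part.length, st.2 ++ [st.1.take part.length])) (w, acc)).2
      = acc ++ pvCuts w (parts.map List.length) := by
  induction parts with
  | nil => intro w acc; simp [pvCuts]
  | cons p ps ih =>
      intro w acc
      simp only [List.foldl_cons]
      rw [ih]
      simp [pvCuts]

-- B's index-slicing loop computes pvCuts of both strings
theorem cutsLoopB (lens : List Nat) : ∀ (cvs wl : List Char) (i : Nat)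
    (p lp : List (List Char)),
    lens.foldl (fun (st : List (List Char) × List (List Char) × Nat) (n : Nat) =>
      (st.1 ++ [PySem.List.slice cvs (some (st.2.2 : Int)) (some ((st.2.2 : Int) + (n : Int)))],
       st.2.1 ++ [PySem.List.slice wl (some (st.2.2 : Int)) (some ((st.2.2 : Int) + (n : Int)))],
       st.2.2 + n)) (p, lp, i)
      = (p ++ pvCuts (cvs.drop i) lens, lp ++ pvCuts (wl.drop i) lens, i + lens.sum) := by
  induction lens with
  | nil => intro cvs wl i p lp; simp [pvCuts]
  | cons n rest ih =>
      intro cvs wl i p lp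
      simp only [List.foldl_cons]
      rw [ih]
      have hc : ∀ (xs : List Char), PySem.List.slice xs (some (i : Int)) (some ((i : Int) + (n : Int)))
          = (xs.drop i).take n := fun xs => PySem.List.slice_natCast_add xs i n
      simp [pvCuts, hc, List.drop_drop, Nat.add_comm i n]
      omega

-- the two CV step functions are the same function
theorem cv_step_eq : (fun (st : List Char × Bool) letter =>
      if PySem.Chars.lowerChar letter ∈ pvVowels then
        (st.1 ++ [makeUpperA 'v' (st.2 || PySem.Chars.isupper letter)], false)
      else if PySem.Chars.lowerChar letter ∈ pvConsons then
        (st.1 ++ [makeUpperA 'c' (st.2 || PySem.Chars.isupper letter)], false)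
      else
        (st.1 ++ [letter], false))
    = (fun (st : List Char × Bool) ch =>
      let l := PySem.Chars.lowerChar ch
      if l ∈ pvVowels then
        (st.1 ++ [if st.2 || PySem.Chars.isupper ch then 'V' else 'v'], false)
      else if l ∈ pvConsons then
        (st.1 ++ [if st.2 || PySem.Chars.isupper ch then 'C' else 'c'], false)
      else
        (st.1 ++ [ch], false)) := by
  funext st ch
  cases h : (st.2 || PySem.Chars.isupper ch) <;>
    simp [makeUpperA, show PySem.Chars.upperChar 'v' = 'V' from rfl,
      show PySem.Chars.upperChar 'c' = 'C' from rfl]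

-- the whole pipeline after the CV string is fixed: A's side = B's side
theorem pv_core (wl cvs : List Char) (h : cvs ≠ []) :
    ((getPartsA cvs []).map (fun p => String.ofList p),
     (pvUpdLast ((getPartsA cvs []).foldl (fun (st : List Char × List (List Char)) part =>
        (st.1.drop part.length, st.2 ++ [st.1.take part.length])) (wl, [])).2 '.').map
        (fun p => String.ofList p))
    =
    (let r := cvs.foldl (fun (st : List Nat × Nat × Char) (c : Char) =>
        if 0 < st.2.1 ∧ (c = PySem.Chars.lowerChar st.2.2 ∨ c = '.') then
          (st.1, st.2.1 + 1, st.2.2)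
        else
          ((if 0 < st.2.1 then st.1 ++ [st.2.1] else st.1), 1, c)) ([], 0, ' ')
     let lens := r.1 ++ [r.2.1]
     let s := lens.foldl (fun (st : List (List Char) × List (List Char) × Nat) (n : Nat) =>
        (st.1 ++ [PySem.List.slice cvs (some (st.2.2 : Int)) (some ((st.2.2 : Int) + (n : Int)))],
         st.2.1 ++ [PySem.List.slice wl (some (st.2.2 : Int)) (some ((st.2.2 : Int) + (n : Int)))],
         st.2.2 + n)) ([], [], 0)
     (s.1.map (fun p => String.ofList p), (pvUpdLast s.2.1 '.').map (fun p => String.ofList p))) := by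
  obtain ⟨c, rest, rfl⟩ : ∃ c rest, cvs = c :: rest := by
    cases cvs with
    | nil => exact absurd rfl h
    | cons c rest => exact ⟨c, rest, rfl⟩
  have hA : getPartsA (c :: rest) [] = pvGrp c [c] rest := by
    show getPartsA rest [[c]] = pvGrp c [c] rest
    simpa using getPartsA_eq_grp rest [] c []
  have hlens0 : ((c :: rest).foldl (fun (st : List Nat × Nat × Char) (c : Char) =>
        if 0 < st.2.1 ∧ (c = PySem.Chars.lowerChar st.2.2 ∨ c = '.') then
          (st.1, st.2.1 + 1, st.2.2)
        else
          ((if 0 < st.2.1 then st.1 ++ [st.2.1] else st.1), 1, c)) ([], 0, ' ')).1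
      ++ [((c :: rest).foldl (fun (st : List Nat × Nat × Char) (c : Char) =>
        if 0 < st.2.1 ∧ (c = PySem.Chars.lowerChar st.2.2 ∨ c = '.') then
          (st.1, st.2.1 + 1, st.2.2)
        else
          ((if 0 < st.2.1 then st.1 ++ [st.2.1] else st.1), 1, c)) ([], 0, ' ')).2.1]
      = pvLens c 1 rest := by
    simpa using lensLoopB rest [] 1 c (by omega)
  have hflat : (pvGrp c [c] rest).flatten = c :: rest := by
    simpa using grp_flatten rest c [c]
  have hlens' : pvLens c 1 rest = (pvGrp c [c] rest).map List.length := by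
    have := lens_eq_grp_map rest c [c]
    simpa using this.symm
  have hcut : pvCuts (c :: rest) ((pvGrp c [c] rest).map List.length) = pvGrp c [c] rest := by
    conv_lhs => rw [← hflat]
    exact cuts_flatten _
  simp only [cutsLoopB, hlens0, hA, lettersLoopA, hlens', List.nil_append, List.drop_zero]
  rw [hcut]

-- ===== VERDICT (by name: the statement is the Claim_ definition above) =====
theorem getLetterParts_spec : Claim_equal_getLetterParts := by
  intro word _
  unfold Spec_getLetterParts getLetterParts getLetterParts_alt
  rw [← cv_step_eq]
  exact pv_core word.toList (convertToCVA word.toList) (by simp [convertToCVA])
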